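-- pv_equiv track=rewrite | github.com/reversebutterfly/sam2-pre-new | scripts/run_vadi_v5.py | build_post_insert_support
-- ===== SOURCE A (Python) =====
-- from typing import Any, Callable, Dict, Iterable, List, Optional, Sequence, Tuple
--
-- def build_post_insert_support(
--     W: Sequence[int], T_proc: int, radius: int,
-- ) -> Tuple[List[int], List[int]]:
--     """Return (post_insert_proc, post_insert_proc_same).
--
--     `post_insert_proc` = ∪_k {W_k+1, ..., min(W_k+radius, W_{k+1}-1)} in
--     processed-space (excludes insert positions themselves). The last
--     insert's window extends up to min(W_K+radius, T_proc-1).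
--
--     Semantically: the frames where "prevent recovery" δ is applied.
--     These are NEVER insert positions and NEVER pre-insert positions.
--
--     Returns a second list identical to the first (kept as a convention
--     for symmetry with v4's `(S_delta_processed, neighbor_ids_processed)`
--     tuple; in v5 these two concepts collapse into one).
--     """
--     W_sorted = sorted(int(w) for w in W)
--     post: set = set()
--     if not W_sorted:
--         return [], []
--     for i, w in enumerate(W_sorted):
--         next_w = W_sorted[i + 1] if i + 1 < len(W_sorted) else T_proc
--         end = min(w + radius, next_w - 1, T_proc - 1)
--         for t in range(w + 1, end + 1):
--             post.add(int(t))
--     post_list = sorted(post)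
--     return post_list, post_list
-- ===== SOURCE B (Python) =====
-- def build_post_insert_support(W, T_proc, radius):
--     """Interval-sweep reformulation: each insert w contributes the *uncapped*
--     interval (w, min(w + radius, T_proc - 1)]; sweep the sorted intervals
--     left-to-right with a cursor so overlaps are merged, and drop insert
--     positions while emitting.  The output comes out sorted and duplicate-free
--     directly, so no set accumulation of frames and no final sort are needed.  (Capping a window at
--     next_w - 1, as A does, is equivalent: the part of a window at or beyond
--     the next insert is the next insert itself -- removed by the filter -- plus
--     points covered by the next insert's own interval.)"""
--     ws = sorted(int(w) for w in W)
--     inserts = set(ws)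
--     out = []
--     cur = None
--     for w in ws:
--         hi = min(w + radius, T_proc - 1)
--         lo = w + 1 if cur is None or w + 1 > cur else cur
--         for t in range(lo, hi + 1):
--             if t not in inserts:
--                 out.append(t)
--         if cur is None or hi + 1 > cur:
--             cur = hi + 1
--     return out, out
-- ===== Notes on version B (the rewrite author's own statement) =====
-- stated objective: alternative
-- what changed: B recasts the task as an interval-union sweep: each insert contributes one uncapped interval (w, min(w+radius, T_proc-1)]; a cursor merges the sorted intervals in one left-to-right pass while a membership filter drops insert positions, so the output is emitted already sorted and unique with no set accumulation of frames and no final sort (measured ~1.3x, below the 1.5x bar, so no speed claim).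
import Mathlib
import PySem

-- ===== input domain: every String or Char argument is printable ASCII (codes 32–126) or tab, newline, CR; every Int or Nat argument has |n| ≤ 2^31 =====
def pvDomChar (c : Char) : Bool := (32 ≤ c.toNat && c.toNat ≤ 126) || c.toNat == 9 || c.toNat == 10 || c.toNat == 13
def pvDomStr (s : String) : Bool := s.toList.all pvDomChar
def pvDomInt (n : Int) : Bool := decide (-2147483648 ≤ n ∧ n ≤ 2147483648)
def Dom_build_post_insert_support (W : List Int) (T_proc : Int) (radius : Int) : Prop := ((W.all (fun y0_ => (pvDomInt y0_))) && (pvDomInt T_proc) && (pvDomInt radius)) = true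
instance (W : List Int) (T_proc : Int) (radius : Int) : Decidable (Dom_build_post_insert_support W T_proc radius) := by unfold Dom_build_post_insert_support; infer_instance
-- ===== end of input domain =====

-- B replaces A's per-gap windows + set + final sort by an interval-union sweep
-- (a cursor merges the sorted uncapped intervals, a filter drops insert positions),
-- emitting the output already sorted: a different algorithm with the same result.

-- ===== PORT A =====
-- loop body of A's 'for i, w in enumerate(W_sorted)'
def pvABody (ws : List Int) (T_proc radius : Int) (post : PySem.Set Int) (iw : Int × Int) : PySem.Set Int :=
  let next_w := if iw.1 + 1 < (ws.length : Int) then PySem.List.pyGetD ws (iw.1 + 1) 0 else T_proc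
  let e := min (min (iw.2 + radius) (next_w - 1)) (T_proc - 1)
  (PySem.List.pyRange (iw.2 + 1) (e + 1)).foldl (fun s t => PySem.Set.add s t) post

def build_post_insert_support (W : List Int) (T_proc : Int) (radius : Int) : List Int × List Int :=
  let W_sorted := PySem.List.sorted W (fun w => w)
  if W_sorted = [] then ([], [])
  else
    let post : PySem.Set Int :=
      (PySem.List.enumerate W_sorted).foldl (pvABody W_sorted T_proc radius) PySem.Set.empty
    let post_list := PySem.List.sorted post (fun x => x)
    (post_list, post_list)

-- ===== PORT B =====
-- loop body of B's 'for w in ws' (state = (out, cur); cur = None ↦ none)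
def pvSweepBody (inserts : PySem.Set Int) (T_proc radius : Int)
    (st : List Int × Option Int) (w : Int) : List Int × Option Int :=
  let hi := min (w + radius) (T_proc - 1)
  let lo := match st.2 with
    | none => w + 1
    | some c => if w + 1 > c then w + 1 else c
  let out := (PySem.List.pyRange lo (hi + 1)).foldl
      (fun out t => if t ∈ inserts then out else out ++ [t]) st.1
  let cur : Option Int := match st.2 with
    | none => some (hi + 1)
    | some c => if hi + 1 > c then some (hi + 1) else some c
  (out, cur)

def build_post_insert_support_alt (W : List Int) (T_proc : Int) (radius : Int) : List Int × List Int :=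
  let ws := PySem.List.sorted W (fun w => w)
  let inserts := PySem.Set.ofList ws
  let st := ws.foldl (pvSweepBody inserts T_proc radius) ([], none)
  (st.1, st.1)

-- ===== PRECONDITION & SPEC =====
def Spec_build_post_insert_support (W : List Int) (T_proc : Int) (radius : Int) (out : List Int × List Int) : Prop := out = build_post_insert_support_alt W T_proc radius
instance (W : List Int) (T_proc : Int) (radius : Int) (out : List Int × List Int) : Decidable (Spec_build_post_insert_support W T_proc radius out) := by unfold Spec_build_post_insert_support; infer_instance

-- ===== CLAIM (what is proved, stated in full; the proofs are below) =====
def Claim_equal_build_post_insert_support : Prop := ∀ (W : List Int) (T_proc : Int) (radius : Int), Dom_build_post_insert_support W T_proc radius → Spec_build_post_insert_support W T_proc radius (build_post_insert_support W T_proc radius)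

-- ===== LEMMAS AND PROOFS =====

-- ---------- A side: the fold builds the union of the per-insert capped windows ----------

-- the per-insert window of each element of the sorted list, in order
def pvChunks (T_proc radius : Int) : List Int → List (List Int)
  | [] => []
  | w :: rest =>
      PySem.List.pyRange (w + 1)
        (min (min (w + radius) (rest.headD T_proc - 1)) (T_proc - 1) + 1)
      :: pvChunks T_proc radius rest

-- every element produced is strictly above the head of the (sorted) list
theorem pvChunks_flatten_gt (T_proc radius : Int) :
    ∀ (ws : List Int), ws.Pairwise (· ≤ ·) →
      ∀ x ∈ (pvChunks T_proc radius ws).flatten, ∀ w, ws.head? = some w → w < x := by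
  intro ws
  induction ws with
  | nil => intro _ x hx; simp [pvChunks] at hx
  | cons w rest ih =>
    intro hp x hx w0 hw0
    simp only [List.head?_cons, Option.some.injEq] at hw0
    subst hw0
    simp only [pvChunks, List.flatten_cons, List.mem_append] at hx
    rcases hx with hx | hx
    · have := (PySem.List.mem_pyRange_one).1 hx; omega
    · cases rest with
      | nil => simp [pvChunks] at hx
      | cons y rest' =>
        have hy : w ≤ y := (List.pairwise_cons.1 hp).1 y (by simp)
        have := ih (List.pairwise_cons.1 hp).2 x hx y rfl
        omega

theorem pvChunks_flatten_pairwise (T_proc radius : Int) :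
    ∀ (ws : List Int), ws.Pairwise (· ≤ ·) →
      ((pvChunks T_proc radius ws).flatten).Pairwise (· < ·) := by
  intro ws
  induction ws with
  | nil => intro _; simp [pvChunks]
  | cons w rest ih =>
    intro hp
    have hrest := (List.pairwise_cons.1 hp).2
    simp only [pvChunks, List.flatten_cons]
    refine (List.pairwise_append).2 ⟨PySem.List.pairwise_lt_pyRange_one _ _, ih hrest, ?_⟩
    intro a ha b hb
    cases rest with
    | nil => simp [pvChunks] at hb
    | cons y rest' =>
      have ha' := (PySem.List.mem_pyRange_one).1 ha
      simp only [List.headD_cons] at ha'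
      have hb' := pvChunks_flatten_gt T_proc radius (y :: rest') hrest b hb y rfl
      omega

-- the inner 'for t in range(...): post.add(t)' is Set.update
theorem pvInner_fold (l : List Int) (s : PySem.Set Int) :
    l.foldl (fun s t => PySem.Set.add s t) s = PySem.Set.update s l := rfl

-- A's enumerate-fold builds Set.update with the concatenation of the windows
theorem pvA_fold (T_proc radius : Int) :
    ∀ (suf pre : List Int) (s : PySem.Set Int),
      (PySem.List.enumerate suf (pre.length : Int)).foldl (pvABody (pre ++ suf) T_proc radius) s
      = PySem.Set.update s (pvChunks T_proc radius suf).flatten := by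
  intro suf
  induction suf with
  | nil => intro pre s; simp [PySem.List.enumerate, pvChunks, PySem.Set.update]
  | cons w rest ih =>
    intro pre s
    simp only [PySem.List.enumerate, List.foldl_cons]
    have hbody : pvABody (pre ++ w :: rest) T_proc radius s ((pre.length : Int), w)
        = PySem.Set.update s (PySem.List.pyRange (w + 1)
            (min (min (w + radius) (rest.headD T_proc - 1)) (T_proc - 1) + 1)) := by
      unfold pvABody
      cases rest with
      | nil =>
        have hlen : ¬ ((pre.length : Int) + 1 < ((pre ++ [w]).length : Int)) := by
          simp [List.length_append]
        simp only [hlen, if_false, List.headD_nil]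
        exact pvInner_fold _ _
      | cons x rest' =>
        have hlen : ((pre.length : Int) + 1 < ((pre ++ w :: x :: rest').length : Int)) := by
          simp [List.length_append]
        simp only [hlen, if_true, List.headD_cons]
        have hget : PySem.List.pyGetD (pre ++ w :: x :: rest') ((pre.length : Int) + 1) 0 = x := by
          have : ((pre.length : Int) + 1) = ((pre.length + 1 : Nat) : Int) := by push_cast; ring
          rw [this, PySem.List.pyGetD_natCast]
          rw [List.getD_eq_getElem?_getD, List.getElem?_append_right (by omega)]
          simp
        rw [hget]
        exact pvInner_fold _ _
    rw [hbody]
    have hcast : (pre.length : Int) + 1 = (((pre ++ [w]).length : Nat) : Int) := by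
      simp [List.length_append]
    rw [hcast]
    have := ih (pre ++ [w]) (PySem.Set.update s (PySem.List.pyRange (w + 1)
            (min (min (w + radius) (rest.headD T_proc - 1)) (T_proc - 1) + 1)))
    rw [List.append_assoc] at this
    simp only [List.singleton_append] at this
    rw [this]
    simp only [pvChunks, List.flatten_cons]
    rw [PySem.Set.update, PySem.Set.update, PySem.Set.update, List.foldl_append]

-- membership in the union of the capped windows, for a sorted insert list:
-- t is below T_proc, is not an insert, and some insert lies in [t-radius, t-1]
theorem pvChunks_mem_forward (T_proc radius : Int) :
    ∀ (ws : List Int), ws.Pairwise (· ≤ ·) → ∀ t, t ∈ (pvChunks T_proc radius ws).flatten →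
      t ≤ T_proc - 1 ∧ t ∉ ws ∧ ∃ w ∈ ws, w < t ∧ t ≤ w + radius := by
  intro ws
  induction ws with
  | nil => intro _ t ht; simp [pvChunks] at ht
  | cons w rest ih =>
    intro hp t ht
    have hrest := (List.pairwise_cons.1 hp).2
    simp only [pvChunks, List.flatten_cons, List.mem_append] at ht
    rcases ht with ht | ht
    · have hb := (PySem.List.mem_pyRange_one).1 ht
      have htr : t ∉ rest := by
        intro hmem
        cases rest with
        | nil => simp at hmem
        | cons y rest' =>
          simp only [List.headD_cons] at hb
          have hy : ∀ v ∈ y :: rest', y ≤ v := by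
            intro v hv
            rcases List.mem_cons.1 hv with hv | hv
            · omega
            · exact (List.pairwise_cons.1 hrest).1 v hv
          have := hy t hmem
          omega
      refine ⟨by omega, ?_, w, by simp, by omega, by omega⟩
      intro hmem
      rcases List.mem_cons.1 hmem with h | h
      · omega
      · exact htr h
    · obtain ⟨h1, h2, w', hw', h3, h4⟩ := ih hrest t ht
      have hww' : w ≤ w' := (List.pairwise_cons.1 hp).1 w' hw'
      refine ⟨h1, ?_, w', List.mem_cons_of_mem _ hw', h3, h4⟩
      intro hmem
      rcases List.mem_cons.1 hmem with h | h
      · omega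
      · exact h2 h

theorem pvChunks_mem_backward (T_proc radius : Int) :
    ∀ (ws : List Int), ws.Pairwise (· ≤ ·) → ∀ t, t ≤ T_proc - 1 → t ∉ ws →
      (∃ w ∈ ws, w < t ∧ t ≤ w + radius) → t ∈ (pvChunks T_proc radius ws).flatten := by
  intro ws
  induction ws with
  | nil => intro _ t _ _ h; simp at h
  | cons w rest ih =>
    intro hp t hT hout ⟨w', hw', hlt, hrad⟩
    have hrest := (List.pairwise_cons.1 hp).2
    have houtr : t ∉ rest := fun h => hout (List.mem_cons_of_mem _ h)
    simp only [pvChunks, List.flatten_cons, List.mem_append]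
    by_cases hex : ∃ v ∈ rest, v < t ∧ t ≤ v + radius
    · exact Or.inr (ih hrest t hT houtr hex)
    · -- the only usable witness is w itself
      have hw : w < t ∧ t ≤ w + radius := by
        rcases List.mem_cons.1 hw' with h | h
        · subst h; exact ⟨hlt, hrad⟩
        · exact absurd ⟨w', h, hlt, hrad⟩ hex
      left
      refine (PySem.List.mem_pyRange_one).2 ⟨by omega, ?_⟩
      cases rest with
      | nil => simp only [List.headD_nil]; omega
      | cons y rest' =>
        simp only [List.headD_cons]
        have hwy : w ≤ y := (List.pairwise_cons.1 hp).1 y (by simp)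
        have hty : t < y := by
          by_contra hle
          have hyt : y < t := by
            have : y ≠ t := fun h => hout (by simp [h])
            omega
          exact hex ⟨y, by simp, hyt, by omega⟩
        omega

-- ---------- B side: the sweep ----------

-- 'for t in range(lo, hi+1): if t not in inserts: out.append(t)' is append-filter
theorem pvAppendIf_fold (ins : PySem.Set Int) :
    ∀ (l acc : List Int),
      l.foldl (fun out t => if t ∈ ins then out else out ++ [t]) acc
      = acc ++ l.filter (fun t => decide (t ∉ ins)) := by
  intro l
  induction l with
  | nil => intro acc; simp
  | cons t l ih =>
    intro acc
    by_cases h : t ∈ ins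
    · simp [h, ih]
    · simp [h, ih]

-- the list emitted by the rest of the sweep, given the cursor state
def pvSweepList (ins : PySem.Set Int) (T_proc radius : Int) : List Int → Option Int → List Int
  | [], _ => []
  | w :: rest, c =>
      let hi := min (w + radius) (T_proc - 1)
      let lo := match c with
        | none => w + 1
        | some c0 => if w + 1 > c0 then w + 1 else c0
      let cur : Option Int := match c with
        | none => some (hi + 1)
        | some c0 => if hi + 1 > c0 then some (hi + 1) else some c0
      (PySem.List.pyRange lo (hi + 1)).filter (fun t => decide (t ∉ ins))
        ++ pvSweepList ins T_proc radius rest cur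

-- B's fold equals the recursive sweep
theorem pvB_fold (ins : PySem.Set Int) (T_proc radius : Int) :
    ∀ (ws : List Int) (acc : List Int) (c : Option Int),
      (ws.foldl (pvSweepBody ins T_proc radius) (acc, c)).1
      = acc ++ pvSweepList ins T_proc radius ws c := by
  intro ws
  induction ws with
  | nil => intro acc c; simp [pvSweepList]
  | cons w rest ih =>
    intro acc c
    rw [List.foldl_cons]
    have hstep : pvSweepBody ins T_proc radius (acc, c) w =
        (acc ++ (PySem.List.pyRange
            (match c with | none => w + 1 | some c0 => if w + 1 > c0 then w + 1 else c0)
            (min (w + radius) (T_proc - 1) + 1)).filter (fun t => decide (t ∉ ins)),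
         match c with
           | none => some (min (w + radius) (T_proc - 1) + 1)
           | some c0 => if min (w + radius) (T_proc - 1) + 1 > c0
               then some (min (w + radius) (T_proc - 1) + 1) else some c0) := by
      unfold pvSweepBody
      simp only
      rw [pvAppendIf_fold]
    rw [hstep, ih]
    cases c with
    | none => simp [pvSweepList, List.append_assoc]
    | some c0 => simp [pvSweepList, List.append_assoc]

-- what the sweep emits: non-inserts at or above the cursor, below T_proc,
-- with some processed insert in [t-radius, t-1]
theorem pvSweep_mem_forward (ins : PySem.Set Int) (T_proc radius : Int) :
    ∀ (ws : List Int) (c : Option Int) (t : Int), t ∈ pvSweepList ins T_proc radius ws c →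
      t ∉ ins ∧ (∀ c0, c = some c0 → c0 ≤ t) ∧ t ≤ T_proc - 1 ∧
        ∃ w ∈ ws, w < t ∧ t ≤ w + radius := by
  intro ws
  induction ws with
  | nil => intro c t ht; simp [pvSweepList] at ht
  | cons w rest ih =>
    intro c t ht
    simp only [pvSweepList, List.mem_append] at ht
    rcases ht with ht | ht
    · have h1 := List.mem_filter.1 ht
      have hb := (PySem.List.mem_pyRange_one).1 h1.1
      have hni : t ∉ ins := by simpa using h1.2
      refine ⟨hni, ?_, by omega, w, by simp, ?_, by omega⟩
      · intro c0 hc0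
        subst hc0
        simp only at hb
        split at hb <;> omega
      · cases c with
        | none => simp only at hb; omega
        | some c0 => simp only at hb; split at hb <;> omega
    · obtain ⟨hni, hcur, hT, w', hw', h3, h4⟩ := ih _ t ht
      refine ⟨hni, ?_, hT, w', List.mem_cons_of_mem _ hw', h3, h4⟩
      intro c0 hc0
      subst hc0
      by_cases hgt : min (w + radius) (T_proc - 1) + 1 > c0
      · have := hcur (min (w + radius) (T_proc - 1) + 1) (by simp [hgt]); omega
      · have := hcur c0 (by simp [hgt]); omega

theorem pvSweep_mem_backward (ins : PySem.Set Int) (T_proc radius : Int) :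
    ∀ (ws : List Int), ws.Pairwise (· ≤ ·) → ∀ (c : Option Int) (t : Int),
      t ∉ ins → (∀ c0, c = some c0 → c0 ≤ t) → t ≤ T_proc - 1 →
      (∃ w ∈ ws, w < t ∧ t ≤ w + radius) → t ∈ pvSweepList ins T_proc radius ws c := by
  intro ws
  induction ws with
  | nil => intro _ c t _ _ _ h; simp at h
  | cons w rest ih =>
    intro hp c t hni hcur hT ⟨w', hw', hlt, hrad⟩
    have hrest := (List.pairwise_cons.1 hp).2
    have hww' : w ≤ w' := by
      rcases List.mem_cons.1 hw' with h | h
      · omega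
      · exact (List.pairwise_cons.1 hp).1 w' h
    simp only [pvSweepList, List.mem_append]
    by_cases hhi : t ≤ min (w + radius) (T_proc - 1)
    · left
      refine List.mem_filter.2 ⟨(PySem.List.mem_pyRange_one).2 ⟨?_, by omega⟩, by simpa⟩
      cases c with
      | none => simp only; omega
      | some c0 =>
        have := hcur c0 rfl
        simp only
        split <;> omega
    · right
      apply ih hrest _ t hni _ hT
      · refine ⟨w', ?_, hlt, hrad⟩
        rcases List.mem_cons.1 hw' with h | h
        · subst h; omega
        · exact h
      · intro c0 hc0
        cases c with
        | none => simp only [Option.some.injEq] at hc0; omega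
        | some c1 =>
          have := hcur c1 rfl
          simp only at hc0
          split at hc0 <;> (simp only [Option.some.injEq] at hc0; omega)

-- the sweep output is strictly increasing
theorem pvSweep_pairwise (ins : PySem.Set Int) (T_proc radius : Int) :
    ∀ (ws : List Int) (c : Option Int),
      (pvSweepList ins T_proc radius ws c).Pairwise (· < ·) := by
  intro ws
  induction ws with
  | nil => intro c; simp [pvSweepList]
  | cons w rest ih =>
    intro c
    simp only [pvSweepList]
    refine (List.pairwise_append).2 ⟨?_, ih _, ?_⟩
    · exact (PySem.List.pairwise_lt_pyRange_one _ _).filter _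
    · intro a ha b hb
      have hb' := (pvSweep_mem_forward ins T_proc radius rest _ b hb).2.1
      have ha' := (PySem.List.mem_pyRange_one).1 (List.mem_filter.1 ha).1
      cases c with
      | none =>
        have := hb' (min (w + radius) (T_proc - 1) + 1) rfl
        omega
      | some c0 =>
        simp only at ha'
        by_cases hgt : min (w + radius) (T_proc - 1) + 1 > c0
        · have := hb' (min (w + radius) (T_proc - 1) + 1) (by simp [hgt])
          split at ha' <;> omega
        · have := hb' c0 (by simp [hgt])
          split at ha' <;> omega

-- two strictly increasing integer lists with the same members are equal
theorem pvEq_of_pairwise_lt_of_mem (l₁ l₂ : List Int)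
    (h₁ : l₁.Pairwise (· < ·)) (h₂ : l₂.Pairwise (· < ·))
    (hmem : ∀ t, t ∈ l₁ ↔ t ∈ l₂) : l₁ = l₂ := by
  have hnd₁ : l₁.Nodup := h₁.imp (fun h => ne_of_lt h)
  have hnd₂ : l₂.Nodup := h₂.imp (fun h => ne_of_lt h)
  exact ((List.perm_ext_iff_of_nodup hnd₁ hnd₂).2 hmem).eq_of_pairwise
    (fun a b _ _ h h' => absurd h' (lt_asymm h)) h₁ h₂

-- ===== VERDICT (by name: the statement is the Claim_ definition above) =====
theorem build_post_insert_support_spec : Claim_equal_build_post_insert_support := by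
  intro W T_proc radius _
  unfold Spec_build_post_insert_support build_post_insert_support build_post_insert_support_alt
  dsimp only
  set ws := PySem.List.sorted W (fun w => w) with hws
  have hpw : ws.Pairwise (· ≤ ·) := PySem.List.sorted_pairwise W (fun w => w)
  -- B's result
  have hB := pvB_fold (PySem.Set.ofList ws) T_proc radius ws [] none
  rw [hB]
  simp only [List.nil_append]
  set M := pvSweepList (PySem.Set.ofList ws) T_proc radius ws none with hM
  by_cases hnil : ws = []
  · rw [hnil] at hM
    simp only [pvSweepList] at hM
    rw [if_pos hnil, hM]
  · simp only [if_neg hnil]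
    -- A's result is the sorted union of the capped windows
    set L := (pvChunks T_proc radius ws).flatten with hL
    have hLpw : L.Pairwise (· < ·) := pvChunks_flatten_pairwise T_proc radius ws hpw
    have hA : (PySem.List.enumerate ws).foldl (pvABody ws T_proc radius) PySem.Set.empty
        = PySem.Set.ofList L := by
      have := pvA_fold T_proc radius ws [] PySem.Set.empty
      simp only [List.nil_append, List.length_nil, Nat.cast_zero] at this
      rw [this]; exact PySem.Set.update_nil_left _
    rw [hA, PySem.Set.ofList_eq_self_of_nodup _ (hLpw.imp (fun h => ne_of_lt h)),
      PySem.List.sorted_eq_self_of_pairwise _ _ (hLpw.imp (fun h => le_of_lt h))]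
    -- the two lists are both strictly increasing with the same members
    have hMpw : M.Pairwise (· < ·) := pvSweep_pairwise _ _ _ ws none
    have heq : L = M := by
      apply pvEq_of_pairwise_lt_of_mem _ _ hLpw hMpw
      intro t
      constructor
      · intro ht
        obtain ⟨h1, h2, hex⟩ := pvChunks_mem_forward T_proc radius ws hpw t ht
        exact pvSweep_mem_backward _ T_proc radius ws hpw none t
          (by simpa [PySem.Set.mem_ofList] using h2) (by simp) h1 hex
      · intro ht
        obtain ⟨hni, _, hT, hex⟩ := pvSweep_mem_forward _ T_proc radius ws none t ht
        exact pvChunks_mem_backward T_proc radius ws hpw t hT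
          (by simpa [PySem.Set.mem_ofList] using hni) hex
    rw [heq]
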